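-- pv_equiv track=rewrite | github.com/Barebore/Algorithms | Tinkoff tasks/new_task/5 copy 2.py | foo
-- ===== SOURCE A (Python) =====
-- def foo(length, lst):
--     count = 0
--     prefix_sums = [0] * (length + 1)
--     for i in range(1, length + 1):
--         prefix_sums[i] = prefix_sums[i-1] + lst[i-1]
--     for i in range(length-1):
--         for j in range(i+1, length+1):
--             if prefix_sums[j] - prefix_sums[i] == 0:
--                 count += length - j + 1
--                 break
--     return count
-- ===== SOURCE B (Python) =====
-- def foo(length, lst):
--     # O(n): prefix sums once, nearest equal-prefix index via dict in a right-to-left pass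
--     prefix = [0]
--     s = 0
--     for k in range(length):
--         s += lst[k]
--         prefix.append(s)
--     nxt = {}
--     nextmatch = []
--     for i in range(length, -1, -1):
--         nextmatch.append(nxt.get(prefix[i]))
--         nxt[prefix[i]] = i
--     nextmatch.reverse()
--     count = 0
--     for i in range(length - 1):
--         j = nextmatch[i]
--         if j is not None:
--             count += length - j + 1
--     return count
-- ===== Notes on version B (the rewrite author's own statement) =====
-- stated objective: faster
-- what changed: Replaced the quadratic inner scan (for each i, linear search for the nearest equal prefix sum) by a single right-to-left pass that records, via a dict, the nearest later index with the same prefix sum, then one linear summing loop.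
import Mathlib
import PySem

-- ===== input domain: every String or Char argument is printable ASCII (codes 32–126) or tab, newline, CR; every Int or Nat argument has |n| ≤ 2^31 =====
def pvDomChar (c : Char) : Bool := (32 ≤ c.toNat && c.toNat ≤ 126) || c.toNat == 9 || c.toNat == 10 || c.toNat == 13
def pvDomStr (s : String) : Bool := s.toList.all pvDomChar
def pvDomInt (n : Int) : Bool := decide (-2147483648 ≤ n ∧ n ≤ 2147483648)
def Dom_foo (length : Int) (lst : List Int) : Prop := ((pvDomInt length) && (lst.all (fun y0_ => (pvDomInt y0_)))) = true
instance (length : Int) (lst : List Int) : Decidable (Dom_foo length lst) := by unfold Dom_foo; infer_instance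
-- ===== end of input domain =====

-- B replaces A's O(n^2) per-start linear scan by a dict-based nearest-equal-prefix pass: O(n).

-- ===== PORT A =====
-- inner 'for j in range(i+1, length+1): if …: count += length-j+1; break'
def fooInner (ps : List Int) (length i : Int) : List Int → Int → Int
  | [], count => count
  | j :: rest, count =>
    if (PySem.List.pyGetD ps j 0 - PySem.List.pyGetD ps i 0) == 0 then count + (length - j + 1)
    else fooInner ps length i rest count

def foo (length : Int) (lst : List Int) : Int :=
  let ps0 : List Int := List.replicate (length + 1).toNat 0
  let ps := (PySem.List.pyRange 1 (length + 1) 1).foldl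
    (fun ps i => PySem.List.pySetD ps i (PySem.List.pyGetD ps (i - 1) 0 + PySem.List.pyGetD lst (i - 1) 0)) ps0
  (PySem.List.pyRange 0 (length - 1) 1).foldl
    (fun count i => fooInner ps length i (PySem.List.pyRange (i + 1) (length + 1) 1) count) 0

-- ===== PORT B =====
def foo_alt (length : Int) (lst : List Int) : Int :=
  let pf := ((PySem.List.pyRange 0 length 1).foldl
    (fun (st : List Int × Int) k =>
      let s := st.2 + PySem.List.pyGetD lst k 0
      (st.1 ++ [s], s)) ([0], 0)).1
  let st2 := (PySem.List.pyRange length (-1) (-1)).foldl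
    (fun (st : PySem.Dict Int Int × List (Option Int)) i =>
      let v := PySem.List.pyGetD pf i 0
      (st.1.insert v i, st.2 ++ [st.1.get? v])) (PySem.Dict.empty, [])
  let nextmatch := st2.2.reverse
  (PySem.List.pyRange 0 (length - 1) 1).foldl
    (fun count i =>
      match PySem.List.pyGetD nextmatch i none with
      | some j => count + (length - j + 1)
      | none => count) 0

-- ===== PRECONDITION & SPEC =====
-- Pre_ excludes exactly the inputs where A raises IndexError (length exceeds len(lst)); B raises there too.
def Pre_foo (length : Int) (lst : List Int) : Prop := length ≤ (lst.length : Int)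
instance (length : Int) (lst : List Int) : Decidable (Pre_foo length lst) := by unfold Pre_foo; infer_instance
def pvWitness_foo : Int × List Int := (2, [1, -1, 3])
def Spec_foo (length : Int) (lst : List Int) (out : Int) : Prop := out = foo_alt length lst
instance (length : Int) (lst : List Int) (out : Int) : Decidable (Spec_foo length lst out) := by unfold Spec_foo; infer_instance

-- ===== CLAIM (what is proved, stated in full; the proofs are below) =====
def Claim_equal_foo : Prop := ∀ (length : Int) (lst : List Int), Dom_foo length lst → Pre_foo length lst → Spec_foo length lst (foo length lst)

-- ===== LEMMAS AND PROOFS =====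

-- the common prefix-sum list
def pfx (lst : List Int) (m : Nat) : List Int := (List.range (m + 1)).map (fun i => ((lst.take i).sum : Int))

theorem length_pfx (lst : List Int) (m : Nat) : (pfx lst m).length = m + 1 := by
  simp [pfx]

theorem pfx_succ (lst : List Int) (m : Nat) :
    pfx lst (m + 1) = pfx lst m ++ [((lst.take (m + 1)).sum : Int)] := by
  simp [pfx, List.range_succ]

-- B's prefix construction yields pfx
theorem bpf_eq (lst : List Int) (m : Nat) (hm : m ≤ lst.length) :
    (PySem.List.pyRange 0 (m : Int) 1).foldl
      (fun (st : List Int × Int) k =>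
        let s := st.2 + PySem.List.pyGetD lst k 0
        (st.1 ++ [s], s)) ([0], 0) = (pfx lst m, (lst.take m).sum) := by
  induction m with
  | zero => simp [PySem.List.pyRange_one_eq_nil, pfx]
  | succ m ih =>
    have hm' : m ≤ lst.length := Nat.le_of_succ_le hm
    have hsplit : PySem.List.pyRange 0 ((m + 1 : Nat) : Int) 1
        = PySem.List.pyRange 0 (m : Int) 1 ++ [(m : Int)] := by
      push_cast
      exact PySem.List.pyRange_one_succ_right (by positivity)
    rw [hsplit, List.foldl_append, ih hm']
    have hlt : m < lst.length := by omega
    have hg : PySem.List.pyGetD lst ((m : Nat) : Int) 0 = lst[m] := by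
      simp [PySem.List.pyGetD_natCast, List.getElem?_eq_getElem hlt]
    have htake : (lst.take (m + 1)).sum = (lst.take m).sum + lst[m] :=
      List.sum_take_succ lst m hlt
    rw [pfx_succ]
    simp [hg, htake]

-- A's prefix construction yields pfx (padded with the untouched zeros)
theorem apf_eq (lst : List Int) (n m : Nat) (hm : m ≤ n) (hn : n ≤ lst.length) :
    (PySem.List.pyRange 1 ((m : Int) + 1) 1).foldl
      (fun ps i => PySem.List.pySetD ps i (PySem.List.pyGetD ps (i - 1) 0 + PySem.List.pyGetD lst (i - 1) 0))
      (List.replicate (n + 1) 0)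
    = pfx lst m ++ List.replicate (n - m) 0 := by
  induction m with
  | zero =>
    rw [PySem.List.pyRange_one_eq_nil (by norm_num)]
    simp [pfx, List.replicate_succ]
  | succ m ih =>
    have hmn : m < n := by omega
    have hlt : m < lst.length := by omega
    have hsplit : PySem.List.pyRange 1 (((m + 1 : Nat) : Int) + 1) 1
        = PySem.List.pyRange 1 ((m : Int) + 1) 1 ++ [(m : Int) + 1] := by
      push_cast
      exact PySem.List.pyRange_one_succ_right (by omega)
    rw [hsplit, List.foldl_append, ih (by omega)]
    have hidx : ((m : Int) + 1) - 1 = ((m : Nat) : Int) := by ring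
    have hg1 : PySem.List.pyGetD (pfx lst m ++ List.replicate (n - m) 0) ((m : Nat) : Int) 0
        = (lst.take m).sum := by
      rw [PySem.List.pyGetD_natCast]
      have hm2 : m < (pfx lst m).length := by simp [length_pfx]
      simp only [List.getD]
      rw [List.getElem?_append_left hm2]
      simp [pfx]
    have hg2 : PySem.List.pyGetD lst ((m : Nat) : Int) 0 = lst[m] := by
      simp [PySem.List.pyGetD_natCast, List.getElem?_eq_getElem hlt]
    have hcast : ((m : Int) + 1) = (((m + 1 : Nat)) : Int) := by push_cast; ring
    simp only [List.foldl_cons, List.foldl_nil]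
    rw [hidx, hg1, hg2, hcast, PySem.List.pySetD_natCast]
    have hrepl : List.replicate (n - m) (0 : Int) = 0 :: List.replicate (n - (m + 1)) 0 := by
      have : n - m = (n - (m + 1)) + 1 := by omega
      rw [this, List.replicate_succ]
    rw [hrepl, pfx_succ]
    have hset : (pfx lst m ++ (0 : Int) :: List.replicate (n - (m + 1)) 0).set (m + 1)
        ((lst.take m).sum + lst[m])
        = pfx lst m ++ ((lst.take m).sum + lst[m]) :: List.replicate (n - (m + 1)) 0 := by
      rw [List.set_append_right _ _ (by simp [length_pfx])]
      simp [length_pfx]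
    rw [hset, List.sum_take_succ lst m hlt]
    simp

-- nearest later equal-prefix index, as a find? over the index range
def nmF (P : List Int) (N i : Int) : Option Int :=
  (PySem.List.pyRange (i + 1) (N + 1) 1).find? (fun j => PySem.List.pyGetD P j 0 == PySem.List.pyGetD P i 0)

theorem fooInner_char (ps : List Int) (length i : Int) (js : List Int) (c : Int) :
    fooInner ps length i js c
      = c + (match js.find? (fun j => PySem.List.pyGetD ps j 0 == PySem.List.pyGetD ps i 0) with
             | some j => length - j + 1
             | none => 0) := by
  induction js generalizing c with
  | nil => simp [fooInner]
  | cons j rest ih =>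
    by_cases h : PySem.List.pyGetD ps j 0 = PySem.List.pyGetD ps i 0
    · simp [fooInner, List.find?, h]
    · have hb : ((PySem.List.pyGetD ps j 0 - PySem.List.pyGetD ps i 0) == 0) = false := by
        simp [Int.sub_eq_zero, h]
      have hb2 : (PySem.List.pyGetD ps j 0 == PySem.List.pyGetD ps i 0) = false := by simp [h]
      simp [fooInner, List.find?, hb, hb2, ih]

-- B's right-to-left pass collects exactly the nearest-equal-prefix answers
set_option maxRecDepth 4000 in
theorem down_loop (P : List Int) (N : Int) (m : Nat) (hm : (m : Int) ≤ N)
    (d : PySem.Dict Int Int) (acc : List (Option Int))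
    (hd : ∀ v, d.get? v
        = (PySem.List.pyRange ((m : Int) + 1) (N + 1) 1).find? (fun j => PySem.List.pyGetD P j 0 == v)) :
    ((PySem.List.pyRange (m : Int) (-1) (-1)).foldl
      (fun (st : PySem.Dict Int Int × List (Option Int)) i =>
        let v := PySem.List.pyGetD P i 0
        (st.1.insert v i, st.2 ++ [st.1.get? v])) (d, acc)).2
    = acc ++ (PySem.List.pyRange (m : Int) (-1) (-1)).map (fun i => nmF P N i) := by
  induction m generalizing d acc with
  | zero =>
    rw [PySem.List.pyRange_neg_one_cons (by norm_num), PySem.List.pyRange_neg_one_eq_nil (by norm_num)]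
    simp [nmF, hd]
  | succ m ih =>
    have hcons : PySem.List.pyRange ((m + 1 : Nat) : Int) (-1) (-1)
        = ((m + 1 : Nat) : Int) :: PySem.List.pyRange ((m : Nat) : Int) (-1) (-1) := by
      rw [PySem.List.pyRange_neg_one_cons (by push_cast; omega)]
      norm_num
    rw [hcons]
    simp only [List.foldl_cons, List.map_cons]
    have hstep := ih (by omega)
      (d.insert (PySem.List.pyGetD P ((m + 1 : Nat) : Int) 0) ((m + 1 : Nat) : Int))
      (acc ++ [d.get? (PySem.List.pyGetD P ((m + 1 : Nat) : Int) 0)])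
      (by
        intro w
        have hc : PySem.List.pyRange (((m : Nat) : Int) + 1) (N + 1) 1
            = ((m + 1 : Nat) : Int) :: PySem.List.pyRange (((m + 1 : Nat) : Int) + 1) (N + 1) 1 := by
          rw [show (((m : Nat) : Int) + 1) = ((m + 1 : Nat) : Int) by push_cast; ring]
          exact PySem.List.pyRange_one_cons (by omega)
        rw [hc, PySem.Dict.get?_insert, List.find?]
        by_cases hw : w = PySem.List.pyGetD P ((m + 1 : Nat) : Int) 0
        · simp [hw]
        · have hM : ((m : Nat) : Int) + 1 = ((m + 1 : Nat) : Int) := by push_cast; ring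
          have hbf : (PySem.List.pyGetD P ((m + 1 : Nat) : Int) 0 == w) = false := by
            simp only [beq_eq_false_iff_ne, ne_eq]
            exact fun h => hw h.symm
          rw [if_neg hw, hbf]
          exact hd w)
    rw [hstep, hd]
    simp only [nmF, List.append_assoc, List.singleton_append]

-- ===== VERDICT (by name: the statement is the Claim_ definition above) =====
theorem foo_spec : Claim_equal_foo := by
  intro length lst _ hpre
  unfold Spec_foo
  by_cases hneg : length < 0
  · have h1 : PySem.List.pyRange 0 (length - 1) 1 = [] := PySem.List.pyRange_one_eq_nil (by omega)
    simp [foo, foo_alt, h1]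
  · have hn0 : 0 ≤ length := not_lt.mp hneg
    obtain ⟨n, rfl⟩ : ∃ n : Nat, length = (n : Int) := ⟨length.toNat, (Int.toNat_of_nonneg hn0).symm⟩
    have hlen : n ≤ lst.length := by unfold Pre_foo at hpre; exact_mod_cast hpre
    simp only [foo, foo_alt]
    rw [show ((n : Int) + 1).toNat = n + 1 from by omega]
    rw [apf_eq lst n n le_rfl hlen, bpf_eq lst n hlen]
    have hd0 : ∀ v : Int, (PySem.Dict.empty : PySem.Dict Int Int).get? v
        = (PySem.List.pyRange ((n : Int) + 1) ((n : Int) + 1) 1).find?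
            (fun j => PySem.List.pyGetD (pfx lst n) j 0 == v) := by
      intro v
      rw [PySem.List.pyRange_one_eq_nil le_rfl]
      simp
    rw [down_loop (pfx lst n) ((n : Int)) n le_rfl PySem.Dict.empty [] hd0, List.nil_append]
    rw [PySem.List.pyRange_neg_one_eq_reverse]
    rw [show ((-1 : Int) + 1) = 0 from by ring]
    rw [List.map_reverse, List.reverse_reverse]
    simp only [Nat.sub_self, List.replicate, List.append_nil]
    apply PySem.List.foldl_congr_mem
    intro c i hi
    obtain ⟨hi0, hi1⟩ := (PySem.List.mem_pyRange_one).mp hi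
    rw [fooInner_char]
    rw [PySem.List.pyGetD_map_pyRange_of_nonneg _ _ _ _ hi0 (by omega)]
    cases h : (PySem.List.pyRange (i + 1) ((n : Int) + 1) 1).find?
        (fun j => PySem.List.pyGetD (pfx lst n) j 0 == PySem.List.pyGetD (pfx lst n) i 0) with
    | none => simp [nmF, h]
    | some j => simp [nmF, h]
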